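-- pv_equiv track=rewrite | github.com/volcengine/verl | atropos/environments/intern_bootcamp/internbootcamp_lib/internbootcamp/bootcamp/g1intoblockseasyversion/g1intoblockseasyversion.py | compute_difficulty
-- ===== SOURCE A (Python) =====
-- from collections import defaultdict
--
-- def compute_difficulty(arr):
--     position_map = defaultdict(list)
--     for idx, num in enumerate(arr):
--         position_map[num].append(idx)
--
--     if not position_map:
--         return 0
--
--     intervals = []
--     for num in position_map:
--         indices = position_map[num]
--         intervals.append((indices[0], indices[-1], num))
--
--     intervals.sort()
--     merged = []
--     for interval in intervals:
--         if not merged: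
--             merged.append(interval)
--         else:
--             last_start, last_end, _ = merged[-1]
--             curr_start, curr_end, _ = interval
--             if curr_start <= last_end:
--                 merged[-1] = (last_start, max(last_end, curr_end), None)
--             else:
--                 merged.append(interval)
--
--     total = 0
--     for (l, r, _) in merged:
--         freq = defaultdict(int)
--         for i in range(l, r+1):
--             freq[arr[i]] += 1
--         max_freq = max(freq.values())
--         total += (r - l + 1) - max_freq
--
--     return total
-- ===== SOURCE B (Python) =====
-- def compute_difficulty(arr):
--     # One pass over arr collecting, per value, its global count and its first/last
--     # occurrence; then one pass over the values in first-occurrence order, merging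
--     # them into blocks by the "first > current block end" rule while aggregating the
--     # maximum global count per block.  Since every block fully contains all
--     # occurrences of each of its values, the block lengths sum to len(arr) and the
--     # in-block frequency of a value equals its global count, so the answer is
--     # len(arr) minus the sum over blocks of the maximum global count.
--     count = {}
--     first = {}
--     last = {}
--     for i, v in enumerate(arr):
--         count[v] = count.get(v, 0) + 1
--         if v not in first:
--             first[v] = i
--         last[v] = i
--     total = len(arr)
--     cur_end = -1
--     cur_best = 0
--     for v in first:
--         if first[v] > cur_end:
--             total -= cur_best
--             cur_best = count[v]
--             cur_end = last[v]
--         else: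
--             cur_end = max(cur_end, last[v])
--             cur_best = max(cur_best, count[v])
--     return total - cur_best
-- ===== Notes on version B (the rewrite author's own statement) =====
-- stated objective: faster
-- what changed: Instead of sorting per-value intervals, merging them and re-scanning every merged block with a fresh frequency dict, B collects count/first/last per value in one pass and makes a single pass over the values in first-occurrence order, merging by the same overlap rule while aggregating the maximum global count per block; the answer is len(arr) minus the sum of those maxima.
import Mathlib
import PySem

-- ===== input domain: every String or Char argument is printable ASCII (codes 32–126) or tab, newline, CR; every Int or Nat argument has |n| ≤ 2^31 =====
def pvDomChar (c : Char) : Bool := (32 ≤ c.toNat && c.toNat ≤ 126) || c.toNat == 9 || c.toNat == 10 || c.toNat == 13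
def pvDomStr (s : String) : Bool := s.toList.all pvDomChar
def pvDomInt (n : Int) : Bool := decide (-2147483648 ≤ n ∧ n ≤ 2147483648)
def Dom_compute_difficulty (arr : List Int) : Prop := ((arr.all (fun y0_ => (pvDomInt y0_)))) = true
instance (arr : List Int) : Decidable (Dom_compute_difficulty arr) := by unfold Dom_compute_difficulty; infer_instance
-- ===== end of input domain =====

-- B replaces A's sort+merge of value intervals and per-block frequency re-scan by two
-- linear passes (count/first/last per value, then one merge-and-aggregate pass over the
-- values in first-occurrence order); measurably faster by a constant factor.


-- ===== PORT A =====
def compute_difficulty (arr : List Int) : Int :=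
  let position_map : PySem.Dict Int (List Int) :=
    (PySem.List.enumerate arr).foldl
      (fun d p => d.modify p.2 [] (fun l => l ++ [p.1])) PySem.Dict.empty
  if position_map.size = 0 then 0
  else
    let intervals : List (Int × Int × Option Int) :=
      position_map.keys.foldl (fun acc num =>
        let indices := position_map.getD num []
        -- indices is nonempty for every key; indices[0] / indices[-1] ported with default 0
        acc ++ [(PySem.List.pyGetD indices 0 0, PySem.List.pyGetD indices (-1) 0, some num)]) []
    -- Python sorts the (start, end, num) triples lexicographically; the start components
    -- (first-occurrence indices) are pairwise distinct, so sorting by start is exact here.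
    let sortedIntervals := PySem.List.sorted intervals (fun t => t.1)
    let merged := sortedIntervals.foldl (fun m iv =>
      match m.getLast? with
      | none => m ++ [iv]
      | some (ls, le, _) =>
        if iv.1 ≤ le then m.dropLast ++ [(ls, max le iv.2.1, (none : Option Int))]
        else m ++ [iv]) ([] : List (Int × Int × Option Int))
    merged.foldl (fun total b =>
      let freq : PySem.Dict Int Int :=
        (PySem.List.pyRange b.1 (b.2.1 + 1)).foldl
          (fun d i => d.modify (PySem.List.pyGetD arr i 0) 0 (fun c => c + 1)) PySem.Dict.empty
      -- freq is nonempty (r ≥ l), so max(freq.values()) is ported with default 0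
      let max_freq := (PySem.List.max? freq.values (fun x => x)).getD 0
      total + ((b.2.1 - b.1 + 1) - max_freq)) 0

-- ===== PORT B =====
def compute_difficulty_alt (arr : List Int) : Int :=
  let st := (PySem.List.enumerate arr).foldl
    (fun s p =>
      (s.1.insert p.2 (s.1.getD p.2 0 + 1),
       (if s.2.1.contains p.2 then s.2.1 else s.2.1.insert p.2 p.1),
       s.2.2.insert p.2 p.1))
    ((PySem.Dict.empty : PySem.Dict Int Int), (PySem.Dict.empty : PySem.Dict Int Int),
     (PySem.Dict.empty : PySem.Dict Int Int))
  let count := st.1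
  let first := st.2.1
  let last := st.2.2
  let fin := first.keys.foldl (fun (s : Int × Int × Int) v =>
      if first.getD v 0 > s.2.1 then (s.1 - s.2.2, last.getD v 0, count.getD v 0)
      else (s.1, max s.2.1 (last.getD v 0), max s.2.2 (count.getD v 0)))
    ((arr.length : Int), -1, 0)
  fin.1 - fin.2.2


-- ===== PRECONDITION & SPEC =====
def Spec_compute_difficulty (arr : List Int) (out : Int) : Prop := out = compute_difficulty_alt arr
instance (arr : List Int) (out : Int) : Decidable (Spec_compute_difficulty arr out) := by unfold Spec_compute_difficulty; infer_instance

-- ===== CLAIM (what is proved, stated in full; the proofs are below) =====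
def Claim_equal_compute_difficulty : Prop := ∀ (arr : List Int), Dom_compute_difficulty arr → Spec_compute_difficulty arr (compute_difficulty arr)

-- ===== LEMMAS AND PROOFS =====
def pvOccs (arr : List Int) (v : Int) : List Int :=
  ((PySem.List.enumerate arr).filter (fun p => p.2 == v)).map (fun p => p.1)

def pvFi (arr : List Int) (v : Int) : Int := PySem.List.pyGetD (pvOccs arr v) 0 0
def pvLa (arr : List Int) (v : Int) : Int := PySem.List.pyGetD (pvOccs arr v) (-1) 0
def pvCnt (arr : List Int) (v : Int) : Int := (arr.count v : Int)

theorem pvOccs_append (arr : List Int) (x v : Int) :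
    pvOccs (arr ++ [x]) v = pvOccs arr v ++ (if x = v then [(arr.length : Int)] else []) := by
  unfold pvOccs
  rw [PySem.List.enumerate_append, List.filter_append, List.map_append]
  congr 1
  simp [PySem.List.enumerate_cons, PySem.List.enumerate_nil, List.filter_cons]
  split_ifs with h
  · simp
  · simp

theorem pvMem_occs (arr : List Int) (v i : Int) :
    i ∈ pvOccs arr v ↔ 0 ≤ i ∧ i < (arr.length : Int) ∧ PySem.List.pyGetD arr i 0 = v := by
  unfold pvOccs
  simp only [List.mem_map, List.mem_filter, PySem.List.mem_enumerate_iff]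
  constructor
  · rintro ⟨p, ⟨⟨k, hk, rfl⟩, hv⟩, rfl⟩
    simp only [zero_add] at *
    refine ⟨by positivity, by exact_mod_cast hk, ?_⟩
    rw [PySem.List.pyGetD_natCast, List.getD_eq_getElem _ _ hk]
    simpa using hv
  · rintro ⟨h0, hn, hv⟩
    refine ⟨(i, v), ⟨⟨i.toNat, by omega, ?_⟩, by simp⟩, rfl⟩
    have : ((i.toNat : Int)) = i := by omega
    rw [← hv, PySem.List.pyGetD_eq_getElem _ _ h0 hn]
    simp [this]

theorem pvOccs_sorted (arr : List Int) (v : Int) : (pvOccs arr v).Pairwise (· < ·) := by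
  unfold pvOccs
  exact ((PySem.List.pairwise_lt_enumerate arr 0).filter _).map _ (fun a b h => h)

theorem pvOccs_ne_nil_iff (arr : List Int) (v : Int) : pvOccs arr v ≠ [] ↔ v ∈ arr := by
  constructor
  · intro h
    match he : pvOccs arr v with
    | [] => exact absurd he h
    | i :: t =>
      have : i ∈ pvOccs arr v := by rw [he]; exact List.mem_cons_self
      rw [pvMem_occs] at this
      obtain ⟨h0, hn, hv⟩ := this
      rw [← hv, PySem.List.pyGetD_eq_getElem _ _ h0 hn]
      exact List.getElem_mem _
  · intro hv h
    obtain ⟨k, hk, rfl⟩ := List.getElem_of_mem hv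
    have : (k : Int) ∈ pvOccs arr (arr[k]) := by
      rw [pvMem_occs]
      refine ⟨by positivity, by exact_mod_cast hk, ?_⟩
      rw [PySem.List.pyGetD_natCast, List.getD_eq_getElem _ _ hk]
    rw [h] at this; exact absurd this (List.not_mem_nil)

-- every member of a <-sorted list is at most its last element
theorem pvSorted_le_getLast {l : List Int} (hs : l.Pairwise (· < ·)) {i : Int} (hi : i ∈ l)
    (h : l ≠ []) : i ≤ l.getLast h := by
  induction l with
  | nil => simp at hi
  | cons a t ih =>
    rcases t.eq_nil_or_concat' with rfl | ⟨u, b, rfl⟩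
    · simp at hi; simp [hi]
    · have hlast : (a :: (u ++ [b])).getLast (by simp) = b := by
        rw [List.getLast_cons (by simp)]; simp
      rw [hlast]
      rcases List.mem_cons.1 hi with rfl | hiu
      · have := List.rel_of_pairwise_cons hs (a' := b) (by simp)
        omega
      · have ht := List.Pairwise.of_cons hs
        have := ih ht hiu (by simp)
        rw [List.getLast_concat] at this
        exact this

theorem pvFi_mem {arr : List Int} {v : Int} (hv : v ∈ arr) : pvFi arr v ∈ pvOccs arr v := by
  have hne := (pvOccs_ne_nil_iff arr v).2 hv
  match he : pvOccs arr v with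
  | [] => exact absurd he hne
  | i :: t => rw [pvFi, he, PySem.List.pyGetD_zero_cons]; exact List.mem_cons_self

theorem pvLa_mem {arr : List Int} {v : Int} (hv : v ∈ arr) : pvLa arr v ∈ pvOccs arr v := by
  have hne := (pvOccs_ne_nil_iff arr v).2 hv
  rw [pvLa, PySem.List.pyGetD_neg_one _ _ hne]
  exact List.getLast_mem hne

theorem pvFi_le {arr : List Int} {v i : Int} (hi : i ∈ pvOccs arr v) : pvFi arr v ≤ i := by
  have hne : pvOccs arr v ≠ [] := by intro h; rw [h] at hi; exact absurd hi (List.not_mem_nil)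
  match he : pvOccs arr v with
  | [] => exact absurd he hne
  | j :: t =>
    rw [pvFi, he, PySem.List.pyGetD_zero_cons]
    have hs := pvOccs_sorted arr v
    rw [he] at hs hi
    rcases List.mem_cons.1 hi with rfl | hit
    · exact le_refl _
    · exact le_of_lt (List.rel_of_pairwise_cons hs hit)

theorem pvLe_la {arr : List Int} {v i : Int} (hi : i ∈ pvOccs arr v) : i ≤ pvLa arr v := by
  have hne : pvOccs arr v ≠ [] := by intro h; rw [h] at hi; exact absurd hi (List.not_mem_nil)
  rw [pvLa, PySem.List.pyGetD_neg_one _ _ hne]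
  exact pvSorted_le_getLast (pvOccs_sorted arr v) hi hne

theorem pvValFacts {arr : List Int} {v : Int} (hv : v ∈ arr) :
    0 ≤ pvFi arr v ∧ pvFi arr v ≤ pvLa arr v ∧ pvLa arr v < (arr.length : Int) ∧
    PySem.List.pyGetD arr (pvFi arr v) 0 = v ∧ (1 : Int) ≤ pvCnt arr v := by
  have hf := pvFi_mem hv
  have hl := pvLa_mem hv
  have hf' := (pvMem_occs arr v _).1 hf
  have hl' := (pvMem_occs arr v _).1 hl
  exact ⟨hf'.1, le_trans (pvFi_le hf) (pvLe_la hf), hl'.2.1, hf'.2.2,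
    by unfold pvCnt; have : 0 < arr.count v := List.count_pos_iff.2 hv; omega⟩

theorem pvAtMem (arr : List Int) (i : Int) (h0 : 0 ≤ i) (h1 : i < (arr.length : Int)) :
    PySem.List.pyGetD arr i 0 ∈ arr ∧ i ∈ pvOccs arr (PySem.List.pyGetD arr i 0) := by
  have hm : i ∈ pvOccs arr (PySem.List.pyGetD arr i 0) := (pvMem_occs _ _ _).2 ⟨h0, h1, rfl⟩
  exact ⟨(pvOccs_ne_nil_iff _ _).1 (by intro h; rw [h] at hm; exact absurd hm (List.not_mem_nil)), hm⟩

-- in-block count of a fully contained value equals its global count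
theorem pvSliceCount {arr : List Int} {v l eo : Int} (hv : v ∈ arr)
    (hl0 : 0 ≤ l) (hlf : l ≤ pvFi arr v) (hle : pvLa arr v ≤ eo) (heon : eo < (arr.length : Int)) :
    ((PySem.List.pyRange l (eo + 1)).map (fun i => PySem.List.pyGetD arr i 0)).count v
      = arr.count v := by
  have hfacts := pvValFacts hv
  have hlen : PySem.List.len arr = (arr.length : Int) := rfl
  have harr : arr = (PySem.List.pyRange 0 (arr.length : Int)).map (fun j => PySem.List.pyGetD arr j 0) := by
    rw [← hlen, PySem.List.map_pyGetD_pyRange_zero]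
  have hsplit : PySem.List.pyRange 0 (arr.length : Int) =
      PySem.List.pyRange 0 l ++ PySem.List.pyRange l (eo + 1) ++ PySem.List.pyRange (eo + 1) (arr.length : Int) := by
    rw [List.append_assoc, ← PySem.List.pyRange_one_append l (eo + 1) (arr.length : Int) (by omega) (by omega),
        ← PySem.List.pyRange_one_append 0 l (arr.length : Int) hl0 (by omega)]
  have hc0 : ((PySem.List.pyRange 0 l).map (fun i => PySem.List.pyGetD arr i 0)).count v = 0 := by
    rw [List.count_eq_zero]
    intro hvin
    obtain ⟨i, hi, hiv⟩ := List.mem_map.1 hvin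
    rw [PySem.List.mem_pyRange_one] at hi
    have : i ∈ pvOccs arr v := (pvMem_occs _ _ _).2 ⟨hi.1, by omega, hiv⟩
    have := pvFi_le this
    omega
  have hc2 : ((PySem.List.pyRange (eo + 1) (arr.length : Int)).map (fun i => PySem.List.pyGetD arr i 0)).count v = 0 := by
    rw [List.count_eq_zero]
    intro hvin
    obtain ⟨i, hi, hiv⟩ := List.mem_map.1 hvin
    rw [PySem.List.mem_pyRange_one] at hi
    have : i ∈ pvOccs arr v := (pvMem_occs _ _ _).2 ⟨by omega, hi.2, hiv⟩
    have := pvLe_la this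
    omega
  conv_rhs => rw [harr, hsplit]
  rw [List.map_append, List.map_append, List.count_append, List.count_append, hc0, hc2]
  omega

-- the per-block maximum frequency that A computes equals the running max of global counts over the block's values
theorem pvTermMax (arr : List Int) (G : List Int) (l eo : Int)
    (hGne : G ≠ []) (hnd : G.Nodup)
    (hmem : ∀ v ∈ G, v ∈ arr)
    (hf : ∀ v ∈ G, l ≤ pvFi arr v)
    (he : ∀ v ∈ G, pvLa arr v ≤ eo)
    (hout : ∀ w ∈ arr, w ∉ G → pvLa arr w < l ∨ eo < pvFi arr w)
    (hl0 : 0 ≤ l) (heon : eo < (arr.length : Int)) :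
    (PySem.List.max? ((PySem.List.pyRange l (eo + 1)).foldl
        (fun d i => d.modify (PySem.List.pyGetD arr i 0) 0 (fun c => c + 1)) PySem.Dict.empty).values
      (fun x => x)).getD 0
    = G.foldl (fun a v => max a (pvCnt arr v)) 0 := by
  set s := (PySem.List.pyRange l (eo + 1)).map (fun i => PySem.List.pyGetD arr i 0) with hs
  have hfold : (PySem.List.pyRange l (eo + 1)).foldl
      (fun d i => d.modify (PySem.List.pyGetD arr i 0) 0 (fun c => c + 1)) PySem.Dict.empty
      = PySem.Dict.counter s := by
    rw [PySem.Dict.counter_eq_foldl, hs, List.foldl_map]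
  have hvals : (PySem.Dict.counter s).values = (PySem.Set.ofList s).map (fun k => (s.count k : Int)) := by
    show ((PySem.Dict.counter s).items).map (·.2) = _
    rw [PySem.Dict.items_counter, List.map_map]
    rfl
  have hmem_s : ∀ x, x ∈ s ↔ x ∈ G := by
    intro x
    constructor
    · intro hx
      obtain ⟨i, hi, rfl⟩ := List.mem_map.1 hx
      rw [PySem.List.mem_pyRange_one] at hi
      have hat := pvAtMem arr i (by omega) (by omega)
      by_contra hxG
      rcases hout _ hat.1 hxG with hlt | hgt
      · have := pvLe_la hat.2; omega
      · have := pvFi_le hat.2; omega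
    · intro hx
      have hfacts := pvValFacts (hmem x hx)
      refine List.mem_map.2 ⟨pvFi arr x, ?_, hfacts.2.2.2.1⟩
      rw [PySem.List.mem_pyRange_one]
      exact ⟨hf x hx, by have := he x hx; omega⟩
  have hperm : (PySem.Set.ofList s).Perm G :=
    (List.perm_ext_iff_of_nodup (PySem.Set.nodup_ofList s) hnd).2
      (fun a => (PySem.Set.mem_ofList s a).trans (hmem_s a))
  have hcnt : ∀ k ∈ PySem.Set.ofList s, (s.count k : Int) = pvCnt arr k := by
    intro k hk
    have hkG : k ∈ G := (hmem_s k).1 ((PySem.Set.mem_ofList s k).1 hk)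
    have := pvSliceCount (hmem k hkG) hl0 (hf k hkG) (he k hkG) heon
    rw [← hs] at this
    unfold pvCnt
    exact_mod_cast this
  have hmapeq : (PySem.Set.ofList s).map (fun k => (s.count k : Int)) = (PySem.Set.ofList s).map (pvCnt arr) :=
    List.map_congr_left hcnt
  have hpermmap : ((PySem.Set.ofList s).map (pvCnt arr)).Perm (G.map (pvCnt arr)) := hperm.map _
  rw [hfold, hvals, hmapeq]
  have hLne : (PySem.Set.ofList s).map (pvCnt arr) ≠ [] := by
    intro h
    rw [h] at hpermmap
    exact hGne (List.map_eq_nil_iff.1 (List.perm_nil.1 hpermmap.symm))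
  match hL : (PySem.Set.ofList s).map (pvCnt arr) with
  | [] => exact absurd hL hLne
  | x :: t =>
    rw [PySem.List.max?_id_cons, Option.getD_some]
    have hx0 : (0 : Int) ≤ x := by
      have hxm : x ∈ (PySem.Set.ofList s).map (pvCnt arr) := by rw [hL]; exact List.mem_cons_self
      obtain ⟨k, _, rfl⟩ := List.mem_map.1 hxm
      unfold pvCnt; positivity
    have h1 : t.foldl max x = (x :: t).foldl max 0 := by
      show _ = t.foldl max (max 0 x)
      rw [max_eq_right hx0]
    rw [h1, ← hL]
    rw [hpermmap.foldl_eq' (by intro a _ b _ z; rw [max_right_comm]) 0]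
    rw [List.foldl_map]

theorem pvPyGetD_nil (i d : Int) : PySem.List.pyGetD ([] : List Int) i d = d := by
  simp [PySem.List.pyGetD, PySem.List.pyGet?]

theorem pvOfList_append (arr : List Int) (x : Int) :
    PySem.Set.ofList (arr ++ [x]) =
      if x ∈ arr then PySem.Set.ofList arr else PySem.Set.ofList arr ++ [x] := by
  rw [PySem.Set.ofList_eq_foldl, PySem.Set.ofList_eq_foldl, List.foldl_append]
  show PySem.Set.add _ x = _
  rw [PySem.Set.add]
  have : (List.foldl PySem.Set.add [] arr).contains x = true ↔ x ∈ arr := by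
    rw [← PySem.Set.ofList_eq_foldl]
    show List.contains _ x = true ↔ _
    rw [List.contains_iff_mem, PySem.Set.mem_ofList]
  split_ifs with h1 h2 h2
  · rfl
  · exact absurd (this.1 h1) h2
  · exact absurd (this.2 h2) h1
  · rfl

theorem pvFi_append_of {arr : List Int} {x v : Int} (h : v ∈ arr ∨ v ≠ x) :
    pvFi (arr ++ [x]) v = pvFi arr v := by
  rw [pvFi, pvFi, pvOccs_append]
  by_cases hx : x = v
  · rcases h with hv | hv
    · have hne := (pvOccs_ne_nil_iff arr v).2 hv
      match he : pvOccs arr v with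
      | [] => exact absurd he hne
      | i :: t => rw [if_pos hx]; simp [PySem.List.pyGetD_zero_cons]
    · exact absurd hx.symm hv
  · rw [if_neg hx, List.append_nil]

theorem pvFi_append_self {arr : List Int} {x : Int} (h : x ∉ arr) :
    pvFi (arr ++ [x]) x = (arr.length : Int) := by
  rw [pvFi, pvOccs_append, if_pos rfl]
  have : pvOccs arr x = [] := by
    by_contra hne
    exact h ((pvOccs_ne_nil_iff arr x).1 hne)
  rw [this, List.nil_append, PySem.List.pyGetD_zero_cons]

theorem pvLa_append_ne {arr : List Int} {x v : Int} (h : v ≠ x) :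
    pvLa (arr ++ [x]) v = pvLa arr v := by
  rw [pvLa, pvLa, pvOccs_append, if_neg (fun hh => h hh.symm), List.append_nil]

theorem pvLa_append_self (arr : List Int) (x : Int) :
    pvLa (arr ++ [x]) x = (arr.length : Int) := by
  rw [pvLa, pvOccs_append, if_pos rfl, PySem.List.pyGetD_neg_one_append_singleton]

theorem pvFi_lt_len {arr : List Int} {v : Int} (hv : v ∈ arr) : pvFi arr v < (arr.length : Int) :=
  ((pvMem_occs arr v _).1 (pvFi_mem hv)).2.1

theorem pvValsPairwise (arr : List Int) :
    (PySem.Set.ofList arr).Pairwise (fun u w => pvFi arr u < pvFi arr w) := by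
  induction arr using List.reverseRecOn with
  | nil => simp [PySem.Set.ofList]
  | append_singleton arr x ih =>
    rw [pvOfList_append]
    by_cases hx : x ∈ arr
    · rw [if_pos hx]
      refine ih.imp_of_mem (fun {a b} ha hb hab => ?_)
      rw [pvFi_append_of (Or.inl ((PySem.Set.mem_ofList arr a).1 ha)),
          pvFi_append_of (Or.inl ((PySem.Set.mem_ofList arr b).1 hb))]
      exact hab
    · rw [if_neg hx, List.pairwise_append]
      refine ⟨ih.imp_of_mem (fun {a b} ha hb hab => ?_), by simp, ?_⟩
      · rw [pvFi_append_of (Or.inl ((PySem.Set.mem_ofList arr a).1 ha)),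
            pvFi_append_of (Or.inl ((PySem.Set.mem_ofList arr b).1 hb))]
        exact hab
      · intro a ha b hb
        rw [List.mem_singleton] at hb
        subst hb
        have haa := (PySem.Set.mem_ofList arr a).1 ha
        rw [pvFi_append_of (Or.inl haa), pvFi_append_self hx]
        exact pvFi_lt_len haa

theorem pvVals_cons (a : Int) (t : List Int) : ∃ r, PySem.Set.ofList (a :: t) = a :: r := by
  rw [PySem.Set.ofList_eq_foldl]
  show ∃ r, List.foldl PySem.Set.add (PySem.Set.add [] a) t = a :: r
  have hadd : PySem.Set.add ([] : PySem.Set Int) a = [a] := rfl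
  rw [hadd]
  suffices h : ∀ (t s : List Int), ∃ r, List.foldl PySem.Set.add (a :: s) t = a :: r by
    exact h t []
  intro t
  induction t with
  | nil => exact fun s => ⟨s, rfl⟩
  | cons y u ih =>
    intro s
    show ∃ r, List.foldl PySem.Set.add (PySem.Set.add (a :: s) y) u = a :: r
    rw [PySem.Set.add]
    split_ifs with h
    · exact ih s
    · exact ih (s ++ [y])

theorem pvFi_head (a : Int) (t : List Int) : pvFi (a :: t) a = 0 := by
  rw [pvFi]
  have : pvOccs (a :: t) a = 0 :: ((PySem.List.enumerate t 1).filter (fun p => p.2 == a)).map (fun p => p.1) := by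
    unfold pvOccs
    rw [show PySem.List.enumerate (a :: t) 0 = (0, a) :: PySem.List.enumerate t 1 by
          rw [PySem.List.enumerate_cons]; norm_num]
    rw [List.filter_cons, if_pos (by simp)]
    rfl
  rw [this, PySem.List.pyGetD_zero_cons]

theorem pvCountD (arr : List Int) (v : Int) :
    ((PySem.List.enumerate arr).foldl (fun d p => d.insert p.2 (d.getD p.2 0 + 1))
      (PySem.Dict.empty : PySem.Dict Int Int)).getD v 0 = pvCnt arr v := by
  have h1 : (PySem.List.enumerate arr).foldl (fun d p => d.insert p.2 (d.getD p.2 0 + 1))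
      (PySem.Dict.empty : PySem.Dict Int Int)
      = ((PySem.List.enumerate arr).map (fun p => p.2)).foldl
          (fun d x => d.insert x (d.getD x 0 + 1)) PySem.Dict.empty := by
    rw [List.foldl_map]
  rw [h1, PySem.List.map_snd_enumerate, PySem.Dict.getD_foldl_insert_add_one,
      PySem.Dict.getD_empty, pvCnt, zero_add]

theorem pvLastD (arr : List Int) (v : Int) :
    ((PySem.List.enumerate arr).foldl (fun d p => d.insert p.2 p.1)
      (PySem.Dict.empty : PySem.Dict Int Int)).getD v 0 = pvLa arr v := by
  induction arr using List.reverseRecOn with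
  | nil =>
    rw [PySem.List.enumerate_nil]
    show PySem.Dict.empty.getD v 0 = _
    rw [PySem.Dict.getD_empty, pvLa]
    unfold pvOccs
    rw [PySem.List.enumerate_nil]
    simp [pvPyGetD_nil]
  | append_singleton arr x ih =>
    rw [PySem.List.enumerate_append, List.foldl_append]
    rw [show PySem.List.enumerate [x] (0 + (arr.length : Int)) = [((arr.length : Int), x)] by
          rw [PySem.List.enumerate_cons, PySem.List.enumerate_nil]; norm_num]
    simp only [List.foldl_cons, List.foldl_nil]
    rw [PySem.Dict.getD_insert]
    split_ifs with h
    · subst h; rw [pvLa_append_self]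
    · rw [ih, pvLa_append_ne h]

theorem pvFirstD (arr : List Int) :
    ((PySem.List.enumerate arr).foldl
        (fun d p => if d.contains p.2 then d else d.insert p.2 p.1)
        (PySem.Dict.empty : PySem.Dict Int Int)).keys = PySem.Set.ofList arr ∧
    ∀ v, ((PySem.List.enumerate arr).foldl
        (fun d p => if d.contains p.2 then d else d.insert p.2 p.1)
        (PySem.Dict.empty : PySem.Dict Int Int)).getD v 0 = pvFi arr v := by
  induction arr using List.reverseRecOn with
  | nil =>
    rw [PySem.List.enumerate_nil]
    refine ⟨by simp [PySem.Dict.keys_empty, PySem.Set.ofList], fun v => ?_⟩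
    show PySem.Dict.empty.getD v 0 = _
    rw [PySem.Dict.getD_empty, pvFi]
    unfold pvOccs
    rw [PySem.List.enumerate_nil]
    simp [pvPyGetD_nil]
  | append_singleton arr x ih =>
    obtain ⟨ihk, ihg⟩ := ih
    rw [PySem.List.enumerate_append]
    rw [show PySem.List.enumerate [x] (0 + (arr.length : Int)) = [((arr.length : Int), x)] by
          rw [PySem.List.enumerate_cons, PySem.List.enumerate_nil]; norm_num]
    rw [List.foldl_append, List.foldl_cons, List.foldl_nil]
    set F := (PySem.List.enumerate arr).foldl
        (fun d p => if d.contains p.2 then d else d.insert p.2 p.1)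
        (PySem.Dict.empty : PySem.Dict Int Int) with hF
    have hcont : F.contains x = decide (x ∈ arr) := by
      rw [PySem.Dict.contains_eq_decide_mem_keys, ihk]
      simp [PySem.Set.mem_ofList]
    by_cases hx : x ∈ arr
    · rw [show (if F.contains x = true then F else F.insert x (arr.length : Int)) = F by
            rw [hcont]; simp [hx]]
      refine ⟨by rw [ihk, pvOfList_append, if_pos hx], fun v => ?_⟩
      rw [ihg v, pvFi_append_of]
      by_cases hvx : v = x
      · exact Or.inl (hvx ▸ hx)
      · exact Or.inr hvx
    · rw [show (if F.contains x = true then F else F.insert x (arr.length : Int))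
            = F.insert x (arr.length : Int) by rw [hcont]; simp [hx]]
      have hnc : F.contains x = false := by rw [hcont]; simp [hx]
      refine ⟨?_, fun v => ?_⟩
      · rw [PySem.Dict.keys_insert_of_not_contains _ _ hnc, ihk, pvOfList_append, if_neg hx]
      · rw [PySem.Dict.getD_insert]
        split_ifs with h
        · subst h; rw [pvFi_append_self hx]
        · rw [ihg v, pvFi_append_of (Or.inr h)]

def pvMergeStep (m : List (Int × Int × Option Int)) (iv : Int × Int × Option Int) :
    List (Int × Int × Option Int) :=
  match m.getLast? with
  | none => m ++ [iv]
  | some (ls, le, _) =>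
    if iv.1 ≤ le then m.dropLast ++ [(ls, max le iv.2.1, (none : Option Int))]
    else m ++ [iv]

def pvFreq (arr : List Int) (l r : Int) : PySem.Dict Int Int :=
  (PySem.List.pyRange l (r + 1)).foldl
    (fun d i => d.modify (PySem.List.pyGetD arr i 0) 0 (fun c => c + 1)) PySem.Dict.empty

def pvTermA (arr : List Int) (b : Int × Int × Option Int) : Int :=
  (b.2.1 - b.1 + 1) - (PySem.List.max? (pvFreq arr b.1 b.2.1).values (fun x => x)).getD 0

def pvBStep (arr : List Int) (s : Int × Int × Int) (v : Int) : Int × Int × Int :=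
  if pvFi arr v > s.2.1 then (s.1 - s.2.2, pvLa arr v, pvCnt arr v)
  else (s.1, max s.2.1 (pvLa arr v), max s.2.2 (pvCnt arr v))

theorem pvUpdate_nil (xs : List Int) : PySem.Set.update [] xs = PySem.Set.ofList xs := by
  rw [PySem.Set.ofList_eq_foldl]; rfl

theorem pvAChar (arr : List Int) (hne : arr ≠ []) :
    compute_difficulty arr =
      (((PySem.Set.ofList arr).map (fun v => (pvFi arr v, pvLa arr v, some v))).foldl pvMergeStep
        ([] : List (Int × Int × Option Int))).foldl (fun t b => t + pvTermA arr b) 0 := by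
  have hkeys : ((PySem.List.enumerate arr).foldl
      (fun d p => d.modify p.2 [] (fun l => l ++ [p.1]))
      (PySem.Dict.empty : PySem.Dict Int (List Int))).keys = PySem.Set.ofList arr := by
    have := PySem.Dict.keys_foldl_modify_key (PySem.List.enumerate arr) (fun p => p.2)
      ([] : List Int) (fun d p l => l ++ [p.1]) PySem.Dict.empty
    simpa [PySem.Dict.keys_empty, PySem.List.map_snd_enumerate, pvUpdate_nil] using this
  have hgetD : ∀ v, ((PySem.List.enumerate arr).foldl
      (fun d p => d.modify p.2 [] (fun l => l ++ [p.1]))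
      (PySem.Dict.empty : PySem.Dict Int (List Int))).getD v [] = pvOccs arr v := by
    intro v
    have h1 : (PySem.List.enumerate arr).foldl
        (fun d p => d.modify p.2 [] (fun l => l ++ [p.1]))
        (PySem.Dict.empty : PySem.Dict Int (List Int))
        = ((PySem.List.enumerate arr).map (fun p => (p.2, p.1))).foldl
            (fun d q => d.modify q.1 [] (fun l => l ++ [q.2])) PySem.Dict.empty := by
      rw [List.foldl_map]
    rw [h1, PySem.Dict.getD_foldl_modify_append, PySem.Dict.getD_empty, List.nil_append]
    unfold pvOccs
    rw [List.filter_map]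
    rw [List.map_map]
    rfl
  have hvne : PySem.Set.ofList arr ≠ [] := by
    match arr, hne with
    | a :: t, _ =>
      obtain ⟨r, hr⟩ := pvVals_cons a t
      simp [hr]
  have hsize : ¬ (((PySem.List.enumerate arr).foldl
      (fun d p => d.modify p.2 [] (fun l => l ++ [p.1]))
      (PySem.Dict.empty : PySem.Dict Int (List Int))).size = 0) := by
    have hsz : ∀ (d : PySem.Dict Int (List Int)), d.size = 0 → d.keys = [] := by
      intro d h
      show d.items.map _ = []
      rw [List.eq_nil_of_length_eq_zero h]
      rfl
    intro h
    apply hvne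
    rw [← hkeys]
    exact hsz _ h
  rw [compute_difficulty]
  simp only [if_neg hsize]
  rw [PySem.List.foldl_append_singleton_eq_map
      (fun num => (PySem.List.pyGetD (((PySem.List.enumerate arr).foldl
          (fun d p => d.modify p.2 [] (fun l => l ++ [p.1]))
          (PySem.Dict.empty : PySem.Dict Int (List Int))).getD num []) 0 0,
        PySem.List.pyGetD (((PySem.List.enumerate arr).foldl
          (fun d p => d.modify p.2 [] (fun l => l ++ [p.1]))
          (PySem.Dict.empty : PySem.Dict Int (List Int))).getD num []) (-1) 0, some num))]
  rw [List.nil_append, hkeys]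
  have hmapf : (fun num => (PySem.List.pyGetD (((PySem.List.enumerate arr).foldl
          (fun d p => d.modify p.2 [] (fun l => l ++ [p.1]))
          (PySem.Dict.empty : PySem.Dict Int (List Int))).getD num []) 0 0,
        PySem.List.pyGetD (((PySem.List.enumerate arr).foldl
          (fun d p => d.modify p.2 [] (fun l => l ++ [p.1]))
          (PySem.Dict.empty : PySem.Dict Int (List Int))).getD num []) (-1) 0, some num))
      = (fun v => (pvFi arr v, pvLa arr v, some v)) := by
    funext v
    rw [hgetD v]
    rfl
  rw [hmapf]
  have hsorted : PySem.List.sorted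
      ((PySem.Set.ofList arr).map (fun v => (pvFi arr v, pvLa arr v, some v)))
      (fun t => t.1)
      = (PySem.Set.ofList arr).map (fun v => (pvFi arr v, pvLa arr v, some v)) := by
    apply PySem.List.sorted_eq_of_perm_of_pairwise_lt _ _ _ (List.Perm.refl _)
    exact (List.pairwise_map).2 (pvValsPairwise arr)
  rw [hsorted]
  rfl

theorem pvBChar (arr : List Int) :
    compute_difficulty_alt arr =
      ((PySem.Set.ofList arr).foldl (pvBStep arr) ((arr.length : Int), -1, 0)).1
        - ((PySem.Set.ofList arr).foldl (pvBStep arr) ((arr.length : Int), -1, 0)).2.2 := by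
  rw [compute_difficulty_alt]
  rw [PySem.List.foldl_prod_mk
      (f := fun (d : PySem.Dict Int Int) (p : Int × Int) => d.insert p.2 (d.getD p.2 0 + 1))
      (g := fun (s : PySem.Dict Int Int × PySem.Dict Int Int) (p : Int × Int) =>
        ((if s.1.contains p.2 then s.1 else s.1.insert p.2 p.1), s.2.insert p.2 p.1))]
  rw [PySem.List.foldl_prod_mk
      (f := fun (d : PySem.Dict Int Int) (p : Int × Int) =>
        if d.contains p.2 then d else d.insert p.2 p.1)
      (g := fun (d : PySem.Dict Int Int) (p : Int × Int) => d.insert p.2 p.1)]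
  have hkeys := (pvFirstD arr).1
  have hfirst := (pvFirstD arr).2
  have hstep : (fun (s : Int × Int × Int) (v : Int) =>
      if ((PySem.List.enumerate arr).foldl
            (fun d p => if d.contains p.2 then d else d.insert p.2 p.1)
            (PySem.Dict.empty : PySem.Dict Int Int)).getD v 0 > s.2.1 then
        (s.1 - s.2.2,
          ((PySem.List.enumerate arr).foldl (fun d p => d.insert p.2 p.1)
            (PySem.Dict.empty : PySem.Dict Int Int)).getD v 0,
          ((PySem.List.enumerate arr).foldl (fun d p => d.insert p.2 (d.getD p.2 0 + 1))
            (PySem.Dict.empty : PySem.Dict Int Int)).getD v 0)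
      else
        (s.1,
          max s.2.1 (((PySem.List.enumerate arr).foldl (fun d p => d.insert p.2 p.1)
            (PySem.Dict.empty : PySem.Dict Int Int)).getD v 0),
          max s.2.2 (((PySem.List.enumerate arr).foldl (fun d p => d.insert p.2 (d.getD p.2 0 + 1))
            (PySem.Dict.empty : PySem.Dict Int Int)).getD v 0)))
      = pvBStep arr := by
    funext s v
    rw [pvBStep, hfirst v, pvLastD arr v, pvCountD arr v]
  show ((((PySem.List.enumerate arr).foldl
            (fun (d : PySem.Dict Int Int) (p : Int × Int) =>
              if d.contains p.2 then d else d.insert p.2 p.1)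
            (PySem.Dict.empty : PySem.Dict Int Int)).keys).foldl (fun (s : Int × Int × Int) (v : Int) =>
      if ((PySem.List.enumerate arr).foldl
            (fun d p => if d.contains p.2 then d else d.insert p.2 p.1)
            (PySem.Dict.empty : PySem.Dict Int Int)).getD v 0 > s.2.1 then
        (s.1 - s.2.2,
          ((PySem.List.enumerate arr).foldl (fun d p => d.insert p.2 p.1)
            (PySem.Dict.empty : PySem.Dict Int Int)).getD v 0,
          ((PySem.List.enumerate arr).foldl (fun d p => d.insert p.2 (d.getD p.2 0 + 1))
            (PySem.Dict.empty : PySem.Dict Int Int)).getD v 0)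
      else
        (s.1,
          max s.2.1 (((PySem.List.enumerate arr).foldl (fun d p => d.insert p.2 p.1)
            (PySem.Dict.empty : PySem.Dict Int Int)).getD v 0),
          max s.2.2 (((PySem.List.enumerate arr).foldl (fun d p => d.insert p.2 (d.getD p.2 0 + 1))
            (PySem.Dict.empty : PySem.Dict Int Int)).getD v 0))) ((arr.length : Int), -1, 0)).1 - ((((PySem.List.enumerate arr).foldl
            (fun (d : PySem.Dict Int Int) (p : Int × Int) =>
              if d.contains p.2 then d else d.insert p.2 p.1)
            (PySem.Dict.empty : PySem.Dict Int Int)).keys).foldl (fun (s : Int × Int × Int) (v : Int) =>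
      if ((PySem.List.enumerate arr).foldl
            (fun d p => if d.contains p.2 then d else d.insert p.2 p.1)
            (PySem.Dict.empty : PySem.Dict Int Int)).getD v 0 > s.2.1 then
        (s.1 - s.2.2,
          ((PySem.List.enumerate arr).foldl (fun d p => d.insert p.2 p.1)
            (PySem.Dict.empty : PySem.Dict Int Int)).getD v 0,
          ((PySem.List.enumerate arr).foldl (fun d p => d.insert p.2 (d.getD p.2 0 + 1))
            (PySem.Dict.empty : PySem.Dict Int Int)).getD v 0)
      else
        (s.1,
          max s.2.1 (((PySem.List.enumerate arr).foldl (fun d p => d.insert p.2 p.1)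
            (PySem.Dict.empty : PySem.Dict Int Int)).getD v 0),
          max s.2.2 (((PySem.List.enumerate arr).foldl (fun d p => d.insert p.2 (d.getD p.2 0 + 1))
            (PySem.Dict.empty : PySem.Dict Int Int)).getD v 0))) ((arr.length : Int), -1, 0)).2.2 = ((PySem.Set.ofList arr).foldl (pvBStep arr) ((arr.length : Int), -1, 0)).1
        - ((PySem.Set.ofList arr).foldl (pvBStep arr) ((arr.length : Int), -1, 0)).2.2
  rw [hkeys, hstep]

theorem pvMain (arr : List Int) (rest : List Int) :
    ∀ (pre G : List Int) (done : List (Int × Int × Option Int)) (l eo tot best : Int)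
      (o : Option Int),
    pre ++ G ++ rest = PySem.Set.ofList arr →
    G ≠ [] →
    (∀ w ∈ pre, pvLa arr w < l) →
    (∀ v ∈ G, l ≤ pvFi arr v) →
    (∀ v ∈ G, pvLa arr v ≤ eo) →
    (∃ v ∈ G, eo = pvLa arr v) →
    0 ≤ l →
    best = G.foldl (fun a v => max a (pvCnt arr v)) 0 →
    (done.map (pvTermA arr)).sum = l - ((arr.length : Int) - tot) →
    (rest.foldl (fun m v => pvMergeStep m (pvFi arr v, pvLa arr v, some v))
        (done ++ [(l, eo, o)])).foldl (fun t b => t + pvTermA arr b) 0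
      = (rest.foldl (pvBStep arr) (tot, eo, best)).1
        - (rest.foldl (pvBStep arr) (tot, eo, best)).2.2 := by
  induction rest with
  | nil =>
    intro pre G done l eo tot best o hdecomp hGne hpre hf he heo hl0 hbest htot
    have hnodup : (pre ++ G ++ ([] : List Int)).Nodup := by
      rw [hdecomp]; exact PySem.Set.nodup_ofList arr
    rw [List.append_nil] at hdecomp hnodup
    have hmemarr : ∀ u ∈ pre ++ G, u ∈ arr := by
      intro u hu
      rw [hdecomp] at hu
      exact (PySem.Set.mem_ofList arr u).1 hu
    have hGarr : ∀ u ∈ G, u ∈ arr := fun u hu => hmemarr u (List.mem_append_right _ hu)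
    obtain ⟨w0, hw0G, hw0eo⟩ := heo
    have hw0f := pvValFacts (hGarr w0 hw0G)
    have hleo : l ≤ eo := by
      have := hf w0 hw0G; omega
    have heon : eo < (arr.length : Int) := by omega
    have hterm : pvTermA arr (l, eo, o) = (eo - l + 1) - best := by
      rw [pvTermA, pvFreq]
      rw [pvTermMax arr G l eo hGne (hnodup.sublist (List.sublist_append_right pre G))
          hGarr hf he ?_ hl0 heon]
      · rw [hbest]
      · intro w hw hwG
        have hwv : w ∈ pre ++ G := by rw [hdecomp]; exact (PySem.Set.mem_ofList arr w).2 hw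
        rcases List.mem_append.1 hwv with hwp | hwg
        · exact Or.inl (hpre w hwp)
        · exact absurd hwg hwG
    have hn1 : 0 < arr.length := List.length_pos_iff.2 (by
      intro h; subst h; exact absurd (hGarr w0 hw0G) (List.not_mem_nil))
    have heolast : eo = (arr.length : Int) - 1 := by
      set i : Int := (arr.length : Int) - 1 with hi
      have hat := pvAtMem arr i (by omega) (by omega)
      have hile := pvLe_la hat.2
      have hwm : PySem.List.pyGetD arr i 0 ∈ pre ++ G := by
        rw [hdecomp]; exact (PySem.Set.mem_ofList arr _).2 hat.1
      rcases List.mem_append.1 hwm with hwp | hwg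
      · have := hpre _ hwp; omega
      · have := he _ hwg; omega
    simp only [List.foldl_nil]
    rw [PySem.List.foldl_add _ (pvTermA arr) 0, List.map_append, List.sum_append]
    simp only [List.map_cons, List.map_nil, List.sum_cons, List.sum_nil]
    rw [hterm, htot]
    omega
  | cons v rest' ih =>
    intro pre G done l eo tot best o hdecomp hGne hpre hf he heo hl0 hbest htot
    have hmemarr : ∀ u ∈ pre ++ G ++ (v :: rest'), u ∈ arr := by
      intro u hu
      rw [hdecomp] at hu
      exact (PySem.Set.mem_ofList arr u).1 hu
    have hGarr : ∀ u ∈ G, u ∈ arr := fun u hu =>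
      hmemarr u (List.mem_append.2 (Or.inl (List.mem_append_right _ hu)))
    have hvarr : v ∈ arr := hmemarr v (by simp)
    have hvfacts := pvValFacts hvarr
    have hP : (pre ++ G ++ (v :: rest')).Pairwise (fun u w => pvFi arr u < pvFi arr w) := by
      rw [hdecomp]; exact pvValsPairwise arr
    rw [List.append_assoc] at hP
    obtain ⟨_, hP2, _⟩ := List.pairwise_append.1 hP
    obtain ⟨_, hP3, hGcross⟩ := List.pairwise_append.1 hP2
    have hGv : ∀ u ∈ G, pvFi arr u < pvFi arr v := fun u hu => hGcross u hu v (by simp)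
    have hrest_lb : ∀ w ∈ rest', pvFi arr v < pvFi arr w :=
      fun w hw => List.rel_of_pairwise_cons hP3 hw
    obtain ⟨w0, hw0G, hw0eo⟩ := heo
    have hw0f := pvValFacts (hGarr w0 hw0G)
    have hleo : l ≤ eo := by have := hf w0 hw0G; omega
    rw [List.foldl_cons, List.foldl_cons]
    have hmstep : pvMergeStep (done ++ [(l, eo, o)]) (pvFi arr v, pvLa arr v, some v)
        = if pvFi arr v ≤ eo then done ++ [(l, max eo (pvLa arr v), (none : Option Int))]
          else (done ++ [(l, eo, o)]) ++ [(pvFi arr v, pvLa arr v, some v)] := by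
      rw [pvMergeStep]
      rw [List.getLast?_concat]
      simp only [List.dropLast_concat]
    by_cases hcase : pvFi arr v ≤ eo
    · -- v merges into the open block
      rw [hmstep, if_pos hcase]
      rw [show pvBStep arr (tot, eo, best) v
            = (tot, max eo (pvLa arr v), max best (pvCnt arr v)) by
          rw [pvBStep]; rw [if_neg (by simp; omega)]]
      exact ih pre (G ++ [v]) done l (max eo (pvLa arr v)) tot (max best (pvCnt arr v)) none
        (by rw [← hdecomp]; simp)
        (by simp)
        hpre
        (by intro u hu
            rcases List.mem_append.1 hu with h1 | h1
            · exact hf u h1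
            · rw [List.mem_singleton] at h1; subst h1
              have := hf w0 hw0G
              have := hGv w0 hw0G
              omega)
        (by intro u hu
            rcases List.mem_append.1 hu with h1 | h1
            · have := he u h1; omega
            · rw [List.mem_singleton] at h1; subst h1; omega)
        (by rcases le_total (pvLa arr v) eo with h1 | h1
            · exact ⟨w0, List.mem_append_left _ hw0G, by omega⟩
            · exact ⟨v, List.mem_append_right _ (by simp), by omega⟩)
        hl0
        (by rw [List.foldl_append, ← hbest]; simp)
        htot
    · -- the open block closes; v starts a new block
      have hgt : eo < pvFi arr v := by omega
      rw [hmstep, if_neg hcase]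
      rw [show pvBStep arr (tot, eo, best) v
            = (tot - best, pvLa arr v, pvCnt arr v) by
          rw [pvBStep]; rw [if_pos (by simp; omega)]]
      have hnodup : (pre ++ G ++ (v :: rest')).Nodup := by
        rw [hdecomp]; exact PySem.Set.nodup_ofList arr
      have hterm : pvTermA arr (l, eo, o) = (eo - l + 1) - best := by
        rw [pvTermA, pvFreq]
        rw [pvTermMax arr G l eo hGne
            ((hnodup.sublist (by
              have : G.Sublist (pre ++ G ++ (v :: rest')) := by
                rw [List.append_assoc]
                exact (List.sublist_append_left G (v :: rest')).trans
                  (List.sublist_append_right pre _)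
              exact this)))
            hGarr hf he ?_ hl0 (by omega)]
        · rw [hbest]
        · intro w hw hwG
          have hwv : w ∈ pre ++ G ++ (v :: rest') := by
            rw [hdecomp]; exact (PySem.Set.mem_ofList arr w).2 hw
          rcases List.mem_append.1 hwv with h1 | h1
          · rcases List.mem_append.1 h1 with h2 | h2
            · exact Or.inl (hpre w h2)
            · exact absurd h2 hwG
          · rcases List.mem_cons.1 h1 with h2 | h2
            · subst h2; exact Or.inr hgt
            · exact Or.inr (by have := hrest_lb w h2; omega)
      have hfv_eq : pvFi arr v = eo + 1 := by
        set i : Int := eo + 1 with hi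
        have hat := pvAtMem arr i (by omega) (by omega)
        have hile := pvLe_la hat.2
        have hifge := pvFi_le hat.2
        have hwm : PySem.List.pyGetD arr i 0 ∈ pre ++ G ++ (v :: rest') := by
          rw [hdecomp]; exact (PySem.Set.mem_ofList arr _).2 hat.1
        rcases List.mem_append.1 hwm with h1 | h1
        · rcases List.mem_append.1 h1 with h2 | h2
          · have := hpre _ h2; omega
          · have := he _ h2; omega
        · rcases List.mem_cons.1 h1 with h2 | h2
          · rw [h2] at hifge; omega
          · have := hrest_lb _ h2; omega
      exact ih (pre ++ G) [v] (done ++ [(l, eo, o)]) (pvFi arr v) (pvLa arr v)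
        (tot - best) (pvCnt arr v) (some v)
        (by rw [← hdecomp]; simp)
        (by simp)
        (by intro w hw
            rcases List.mem_append.1 hw with h1 | h1
            · have := hpre w h1; omega
            · have := he w h1; omega)
        (by intro u hu; rw [List.mem_singleton] at hu; subst hu; exact le_refl _)
        (by intro u hu; rw [List.mem_singleton] at hu; subst hu; exact le_refl _)
        ⟨v, by simp⟩
        (by omega)
        (by simp [max_eq_right (show (0:Int) ≤ pvCnt arr v by have := hvfacts.2.2.2.2; omega)])
        (by rw [List.map_append, List.sum_append]
            simp only [List.map_cons, List.map_nil, List.sum_cons, List.sum_nil]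
            rw [hterm, htot]
            omega)

theorem pvEquiv (arr : List Int) : compute_difficulty arr = compute_difficulty_alt arr := by
  by_cases hne : arr = []
  · subst hne; decide
  · rw [pvAChar arr hne, pvBChar arr]
    obtain ⟨a, t, harr⟩ : ∃ a t, arr = a :: t := by
      match arr, hne with
      | a :: t, _ => exact ⟨a, t, rfl⟩
    obtain ⟨r, hvals⟩ := pvVals_cons a t
    rw [← harr] at hvals
    rw [hvals]
    have haarr : a ∈ arr := by rw [harr]; simp
    have hafacts := pvValFacts haarr
    have hfia : pvFi arr a = 0 := by rw [harr]; exact pvFi_head a t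
    rw [List.map_cons, List.foldl_cons, List.foldl_cons]
    rw [show pvMergeStep [] (pvFi arr a, pvLa arr a, some a)
          = [] ++ [(pvFi arr a, pvLa arr a, some a)] by rw [pvMergeStep]; rfl]
    rw [show pvBStep arr ((arr.length : Int), -1, 0) a
          = ((arr.length : Int) - 0, pvLa arr a, pvCnt arr a) by
        rw [pvBStep]; rw [if_pos (by simp; omega)]]
    rw [List.foldl_map]
    exact pvMain arr r [] [a] [] (pvFi arr a) (pvLa arr a) ((arr.length : Int) - 0)
      (pvCnt arr a) (some a)
      (by rw [hvals]; simp)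
      (by simp)
      (by simp)
      (by intro u hu; rw [List.mem_singleton] at hu; subst hu; exact le_refl _)
      (by intro u hu; rw [List.mem_singleton] at hu; subst hu; exact le_refl _)
      ⟨a, by simp⟩
      (by omega)
      (by simp [max_eq_right (show (0:Int) ≤ pvCnt arr a by have := hafacts.2.2.2.2; omega)])
      (by simp [hfia])


-- ===== VERDICT (by name: the statement is the Claim_ definition above) =====
theorem compute_difficulty_spec : Claim_equal_compute_difficulty := by
  intro arr _
  unfold Spec_compute_difficulty
  exact pvEquiv arr
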